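-- pv_equiv track=rewrite | github.com/javierbosch/aoc | 2/python.py | max_rgbs
-- ===== SOURCE A (Python) =====
-- def max_rgbs(rgbs):
--     r_t, g_t, b_t = 0, 0, 0
--     for rgb in rgbs:
--         r,g,b = rgb
--         r_t = r if r > r_t else r_t
--         g_t = g if g > g_t else g_t
--         b_t = b if b > b_t else b_t
--     return (r_t, g_t, b_t)
-- ===== SOURCE B (Python) =====
-- def max_rgbs(rgbs):
--     reds = [r for r, g, b in rgbs]
--     greens = [g for r, g, b in rgbs]
--     blues = [b for r, g, b in rgbs]
--     return (max([0] + reds), max([0] + greens), max([0] + blues))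
-- ===== Notes on version B (the rewrite author's own statement) =====
-- stated objective: alternative
-- what changed: Column-wise decomposition: extract the three colour columns and take max([0]+column) per column, instead of one row pass maintaining three running maxima with conditional updates.
import Mathlib
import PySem

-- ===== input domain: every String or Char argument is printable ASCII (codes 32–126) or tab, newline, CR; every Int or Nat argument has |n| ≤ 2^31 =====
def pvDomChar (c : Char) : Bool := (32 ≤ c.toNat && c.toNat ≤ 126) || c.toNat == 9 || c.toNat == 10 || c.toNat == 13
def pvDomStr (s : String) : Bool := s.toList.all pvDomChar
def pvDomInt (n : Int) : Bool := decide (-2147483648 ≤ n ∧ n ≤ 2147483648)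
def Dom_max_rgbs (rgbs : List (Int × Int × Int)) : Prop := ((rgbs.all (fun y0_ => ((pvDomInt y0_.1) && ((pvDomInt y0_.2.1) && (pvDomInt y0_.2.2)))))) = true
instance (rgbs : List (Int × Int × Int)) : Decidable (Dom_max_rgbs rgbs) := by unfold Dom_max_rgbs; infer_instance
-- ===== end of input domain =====

-- B changes the decomposition: per-column max([0]+col) instead of one row pass with three running maxima (objective: alternative).

-- ===== PORT A =====
-- fold over the rows carrying the state (r_t, g_t, b_t), branches in A's order
def max_rgbs (rgbs : List (Int × Int × Int)) : Int × Int × Int :=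
  rgbs.foldl
    (fun s rgb =>
      let r := rgb.1; let g := rgb.2.1; let b := rgb.2.2
      (if r > s.1 then r else s.1,
       if g > s.2.1 then g else s.2.1,
       if b > s.2.2 then b else s.2.2))
    (0, 0, 0)

-- ===== PORT B =====
-- Python's max over the nonempty list [0] ++ col: exact as a foldl of max with the head 0 as accumulator
def pyMax0 (col : List Int) : Int := col.foldl max 0

def max_rgbs_alt (rgbs : List (Int × Int × Int)) : Int × Int × Int :=
  (pyMax0 (rgbs.map (fun t => t.1)),
   pyMax0 (rgbs.map (fun t => t.2.1)),
   pyMax0 (rgbs.map (fun t => t.2.2)))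

-- ===== PRECONDITION & SPEC =====
def Spec_max_rgbs (rgbs : List (Int × Int × Int)) (out : Int × Int × Int) : Prop := out = max_rgbs_alt rgbs
instance (rgbs : List (Int × Int × Int)) (out : Int × Int × Int) : Decidable (Spec_max_rgbs rgbs out) := by unfold Spec_max_rgbs; infer_instance

-- ===== CLAIM (what is proved, stated in full; the proofs are below) =====
def Claim_equal_max_rgbs : Prop := ∀ (rgbs : List (Int × Int × Int)), Dom_max_rgbs rgbs → Spec_max_rgbs rgbs (max_rgbs rgbs)

-- ===== LEMMAS AND PROOFS =====

theorem max_rgbs_fold_eq (rgbs : List (Int × Int × Int)) (r0 g0 b0 : Int) :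
    rgbs.foldl
      (fun s rgb =>
        let r := rgb.1; let g := rgb.2.1; let b := rgb.2.2
        (if r > s.1 then r else s.1,
         if g > s.2.1 then g else s.2.1,
         if b > s.2.2 then b else s.2.2))
      (r0, g0, b0)
    = ((rgbs.map (fun t => t.1)).foldl max r0,
       (rgbs.map (fun t => t.2.1)).foldl max g0,
       (rgbs.map (fun t => t.2.2)).foldl max b0) := by
  induction rgbs generalizing r0 g0 b0 with
  | nil => rfl
  | cons hd tl ih =>
    have h : ∀ x y : Int, (if x > y then x else y) = max y x := fun x y => by
      rw [max_def]; split_ifs <;> omega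
    simp only [List.foldl_cons, List.map_cons]
    rw [ih]
    simp only [h]

-- ===== VERDICT (by name: the statement is the Claim_ definition above) =====
theorem max_rgbs_spec : Claim_equal_max_rgbs := by
  intro rgbs _
  unfold Spec_max_rgbs max_rgbs max_rgbs_alt pyMax0
  exact max_rgbs_fold_eq rgbs 0 0 0
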